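-- pv_equiv track=rewrite | github.com/Sps9938/CD_LAB | reconizestring.py | is_a_star_b_plus
-- ===== SOURCE A (Python) =====
-- def is_a_star_b_plus(s):
--     i = 0
--     n = len(s)
--     while i < n and s[i] == 'a':
--         i += 1
--     # need at least one b
--     if i >= n or s[i] != 'b':
--         return False
--     while i < n and s[i] == 'b':
--         i += 1
--     return i == n
-- ===== SOURCE B (Python) =====
-- def is_a_star_b_plus(s):
--     # Counting reconstruction: a string matches a*b+ iff all its 'a's form the
--     # prefix and the rest (at least one char) is 'b's, i.e. it equals the
--     # canonical string 'a'*k + 'b'*(n-k) where k is its total count of 'a'.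
--     k = s.count('a')
--     n = len(s)
--     return k < n and s == 'a' * k + 'b' * (n - k)
-- ===== Notes on version B (the rewrite author's own statement) =====
-- stated objective: alternative
-- what changed: Replaces A's two index-advancing scan loops with a counting reconstruction: count the 'a's, rebuild the canonical string 'a'*k + 'b'*(n-k), and test equality (requiring k < n for the nonempty b-run).
import Mathlib
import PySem

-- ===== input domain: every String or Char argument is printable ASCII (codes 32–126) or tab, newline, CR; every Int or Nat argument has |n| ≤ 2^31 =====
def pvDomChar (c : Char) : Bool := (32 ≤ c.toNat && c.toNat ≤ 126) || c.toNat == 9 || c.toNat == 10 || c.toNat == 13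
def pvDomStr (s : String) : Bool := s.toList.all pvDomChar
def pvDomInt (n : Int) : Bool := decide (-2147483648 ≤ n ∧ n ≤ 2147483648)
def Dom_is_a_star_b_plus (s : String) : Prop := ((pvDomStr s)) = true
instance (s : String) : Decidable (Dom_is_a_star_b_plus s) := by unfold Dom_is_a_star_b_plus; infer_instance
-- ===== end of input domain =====

-- B replaces A's two index-advancing scan loops by a counting reconstruction:
-- count the 'a's, rebuild the canonical 'a'*k + 'b'*(n-k) and compare (objective: alternative).

-- ===== PORT A =====
-- first while loop: advance past leading 'a's (state = remaining suffix)
def pvSkipA : List Char → List Char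
  | [] => []
  | c :: t => if c = 'a' then pvSkipA t else c :: t

-- second while loop: advance past leading 'b's
def pvSkipB : List Char → List Char
  | [] => []
  | c :: t => if c = 'b' then pvSkipB t else c :: t

def is_a_star_b_plus (s : String) : Bool :=
  let rest := pvSkipA s.toList
  match rest with
  | [] => false                              -- i >= n
  | c :: t => if c ≠ 'b' then false          -- s[i] != 'b'
              else (pvSkipB (c :: t)).isEmpty -- i == n after the second loop

-- ===== PORT B =====
def is_a_star_b_plus_alt (s : String) : Bool :=
  let l := s.toList
  let k := l.count 'a'      -- s.count('a'): str.count with a 1-char needle = character count (exact)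
  let n := l.length
  decide (k < n) && decide (l = List.replicate k 'a' ++ List.replicate (n - k) 'b')
      -- k < n and s == 'a'*k + 'b'*(n-k)

-- ===== PRECONDITION & SPEC =====
def Spec_is_a_star_b_plus (s : String) (out : Bool) : Prop := out = is_a_star_b_plus_alt s
instance (s : String) (out : Bool) : Decidable (Spec_is_a_star_b_plus s out) := by unfold Spec_is_a_star_b_plus; infer_instance

-- ===== CLAIM (what is proved, stated in full; the proofs are below) =====
def Claim_equal_is_a_star_b_plus : Prop := ∀ (s : String), Dom_is_a_star_b_plus s → Spec_is_a_star_b_plus s (is_a_star_b_plus s)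

-- ===== LEMMAS AND PROOFS =====
lemma pvSkipA_eq_dropWhile (l : List Char) : pvSkipA l = l.dropWhile (· = 'a') := by
  induction l with
  | nil => rfl
  | cons c t ih => simp [pvSkipA, List.dropWhile]; split <;> simp_all

lemma pvSkipB_isEmpty (l : List Char) :
    (pvSkipB l).isEmpty = (l = List.replicate l.length 'b' : Bool) := by
  induction l with
  | nil => rfl
  | cons c t ih =>
    by_cases h : c = 'b'
    · subst h; simpa [pvSkipB, List.replicate_succ] using ih
    · simp [pvSkipB, h, List.replicate_succ]

-- A's value rewritten over the suffix d = dropWhile (· = 'a') of s.toList.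
lemma porta_eq (s : String) :
    is_a_star_b_plus s
    = (!(s.toList.dropWhile (· = 'a')).isEmpty
        && (s.toList.dropWhile (· = 'a')
             = List.replicate (s.toList.dropWhile (· = 'a')).length 'b' : Bool)) := by
  unfold is_a_star_b_plus
  rw [pvSkipA_eq_dropWhile]
  cases h : s.toList.dropWhile (· = 'a') with
  | nil => rfl
  | cons c t =>
    by_cases hc : c = 'b'
    · simp [hc, pvSkipB_isEmpty]
    · simp [hc, List.replicate_succ]

-- The two characterizations agree on every list.
lemma key (l : List Char) :
    (!(l.dropWhile (· = 'a')).isEmpty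
      && (l.dropWhile (· = 'a')
           = List.replicate (l.dropWhile (· = 'a')).length 'b' : Bool))
    = (decide (l.count 'a' < l.length)
        && decide (l = List.replicate (l.count 'a') 'a'
                      ++ List.replicate (l.length - l.count 'a') 'b')) := by
  set d := l.dropWhile (· = 'a') with hd
  have hsplit : l = l.takeWhile (· = 'a') ++ d := (List.takeWhile_append_dropWhile).symm
  have htake : l.takeWhile (· = 'a') = List.replicate (l.takeWhile (· = 'a')).length 'a' := by
    apply List.eq_replicate_of_mem
    intro c hc
    have := List.mem_takeWhile_imp hc
    simpa using this
  rcases Bool.eq_false_or_eq_true (!d.isEmpty && (d = List.replicate d.length 'b' : Bool)) with hL | hL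
  case inl =>
    -- LHS true: show RHS true
    rw [hL]
    symm
    rw [Bool.and_eq_true_iff] at hL
    rcases hL with ⟨h1, h2⟩
    replace h1 : d ≠ [] := by simpa using h1
    rw [decide_eq_true_iff] at h2
    have hcount : l.count 'a' = (l.takeWhile (· = 'a')).length := by
      conv_lhs => rw [hsplit]
      rw [List.count_append, h2]
      have hz : List.count 'a' (List.replicate d.length 'b') = 0 := by
        rw [List.count_replicate]; simp
      rw [hz]
      conv_lhs => rw [htake]
      rw [List.count_replicate]; simp
    have hlen : l.length = (l.takeWhile (· = 'a')).length + d.length := by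
      conv_lhs => rw [hsplit]; rw [List.length_append]
    rw [Bool.and_eq_true_iff]
    constructor
    · rw [decide_eq_true_iff, hcount, hlen]
      have : d.length ≠ 0 := by simpa using (List.length_pos_of_ne_nil h1).ne'
      omega
    · rw [decide_eq_true_iff, hcount]
      have heq : l.length - (l.takeWhile (· = 'a')).length = d.length := by omega
      rw [heq]
      conv_lhs => rw [hsplit]
      rw [← htake, ← h2]
  case inr =>
    -- LHS false: show RHS false
    rw [hL]
    symm
    rw [Bool.and_eq_false_iff] at hL ⊢
    by_contra hR
    push Not at hR
    rcases hR with ⟨h1, h2⟩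
    rw [Bool.ne_false_iff, decide_eq_true_iff] at h1 h2
    set k := l.count 'a' with hk
    have hm : 0 < l.length - k := Nat.sub_pos_of_lt h1
    have hdrop : d = List.replicate (l.length - k) 'b' := by
      rw [hd, h2]
      rw [List.dropWhile_append]
      have h₁ : (List.replicate k 'a').dropWhile (· = 'a') = [] := by
        simp
      simp only [h₁]
      simp only [List.isEmpty_nil, if_true]
      cases hmm : l.length - k with
      | zero => omega
      | succ m => simp [List.replicate_succ]
    rcases hL with hL | hL
    · replace hL : d = [] := by simpa using hL
      rw [hdrop] at hL
      simp at hL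
      omega
    · rw [decide_eq_false_iff_not] at hL
      apply hL
      rw [hdrop]
      simp

-- ===== VERDICT (by name: the statement is the Claim_ definition above) =====
theorem is_a_star_b_plus_spec : Claim_equal_is_a_star_b_plus := by
  intro s _
  unfold Spec_is_a_star_b_plus is_a_star_b_plus_alt
  rw [porta_eq, key]
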